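-- pv_equiv track=rewrite | github.com/MoutonBinoclard/Maths-Info-2025 | Sujet-d-oraux/25_Cottin.py | somme_polynomes
-- ===== SOURCE A (Python) =====
-- def somme_polynomes(L, M):  # Additionne les coefficients des mêmes degrés
--     result = {}
--     for degre, coeff in L + M:
--         if degre in result:
--             result[degre] += coeff
--         else:
--             result[degre] = coeff
--     return sorted(result.items())
-- ===== SOURCE B (Python) =====
-- def somme_polynomes(L, M):  # Additionne les coefficients des memes degres
--     items = sorted(L + M, key=lambda p: p[0])
--     if not items:
--         return []
--     out = []
--     k, acc = items[0]
--     for d, c in items[1:]: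
--         if d == k:
--             acc += c
--         else:
--             out.append((k, acc))
--             k, acc = d, c
--     out.append((k, acc))
--     return out
-- ===== Notes on version B (the rewrite author's own statement) =====
-- stated objective: alternative
-- what changed: Replaces the dict-based accumulation followed by a full sort of the items with a single stable sort by degree followed by one linear pass that sums adjacent runs of equal degree (sorted-adjacency grouping, no dict).
import Mathlib
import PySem

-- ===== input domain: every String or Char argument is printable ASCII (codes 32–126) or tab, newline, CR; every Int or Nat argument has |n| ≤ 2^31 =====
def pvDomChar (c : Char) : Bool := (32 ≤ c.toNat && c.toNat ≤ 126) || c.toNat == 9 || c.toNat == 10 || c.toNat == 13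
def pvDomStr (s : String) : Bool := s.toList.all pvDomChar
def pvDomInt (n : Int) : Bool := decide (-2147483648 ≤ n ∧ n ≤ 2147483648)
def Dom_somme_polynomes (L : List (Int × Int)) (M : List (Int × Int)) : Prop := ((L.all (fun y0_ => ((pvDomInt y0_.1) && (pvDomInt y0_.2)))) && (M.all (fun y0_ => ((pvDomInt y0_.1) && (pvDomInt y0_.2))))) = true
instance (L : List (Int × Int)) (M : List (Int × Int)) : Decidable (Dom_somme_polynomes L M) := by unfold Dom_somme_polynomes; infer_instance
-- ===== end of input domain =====

-- B replaces A's dict accumulation followed by a sort of the items with one stable sort by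
-- degree followed by a single pass summing adjacent runs of equal degree. Both are total here.

-- ===== PORT A =====
-- literal port of A: build a dict degre ↦ running sum over L + M, then sorted(result.items())
-- (Python sorts the pairs as tuples: lexicographic, hence sorted2 on fst then snd)
def somme_polynomes (L : List (Int × Int)) (M : List (Int × Int)) : List (Int × Int) :=
  let result := (L ++ M).foldl
    (fun d p => if d.contains p.1 then d.modify p.1 0 (· + p.2) else d.insert p.1 p.2)
    PySem.Dict.empty
  PySem.List.sorted2 result.items Prod.fst Prod.snd

-- ===== PORT B =====
-- the run-summing pass of Source B: state (k, acc) = current degree and its running coefficient sum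
def pvGroup : Int → Int → List (Int × Int) → List (Int × Int)
  | k, acc, [] => [(k, acc)]
  | k, acc, (d, c) :: rest =>
      if d = k then pvGroup k (acc + c) rest else (k, acc) :: pvGroup d c rest

def somme_polynomes_alt (L : List (Int × Int)) (M : List (Int × Int)) : List (Int × Int) :=
  match PySem.List.sorted (L ++ M) Prod.fst with
  | [] => []
  | (k, v) :: rest => pvGroup k v rest

-- ===== PRECONDITION & SPEC =====
def Spec_somme_polynomes (L : List (Int × Int)) (M : List (Int × Int)) (out : List (Int × Int)) : Prop := out = somme_polynomes_alt L M
instance (L : List (Int × Int)) (M : List (Int × Int)) (out : List (Int × Int)) : Decidable (Spec_somme_polynomes L M out) := by unfold Spec_somme_polynomes; infer_instance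

-- ===== CLAIM (what is proved, stated in full; the proofs are below) =====
def Claim_equal_somme_polynomes : Prop := ∀ (L : List (Int × Int)) (M : List (Int × Int)), Dom_somme_polynomes L M → Spec_somme_polynomes L M (somme_polynomes L M)

-- ===== LEMMAS AND PROOFS =====

-- sum of the coefficients of degree j in ys
def pvT (j : Int) (ys : List (Int × Int)) : Int := ((ys.filter (fun p => p.1 == j)).map (·.2)).sum

-- A's loop body is uniformly "insert the updated running sum"
lemma pvBody_eq (d : PySem.Dict Int Int) (p : Int × Int) :
    (if d.contains p.1 then d.modify p.1 0 (· + p.2) else d.insert p.1 p.2)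
      = d.insert p.1 (d.getD p.1 0 + p.2) := by
  by_cases h : d.contains p.1
  · simp [h, PySem.Dict.modify]
  · simp [h, PySem.Dict.getD_of_not_contains d (0 : Int) (by simpa using h)]

lemma pvGetD_fold (ys : List (Int × Int)) (d : PySem.Dict Int Int) (k : Int) :
    (ys.foldl (fun d p => d.insert p.1 (d.getD p.1 0 + p.2)) d).getD k 0
      = d.getD k 0 + pvT k ys := by
  induction ys generalizing d with
  | nil => simp [pvT]
  | cons p rest ih =>
      simp only [List.foldl_cons, ih, pvT, List.filter_cons]
      by_cases h : p.1 = k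
      · subst h
        simp [PySem.Dict.getD_insert_self]
        ring
      · simp [h, PySem.Dict.getD_insert_of_ne d _ _ (Ne.symm h)]

lemma pvOfList_dup (k : Int) (l : List Int) :
    PySem.Set.ofList (k :: k :: l) = PySem.Set.ofList (k :: l) := by
  simp [PySem.Set.ofList_cons, PySem.Set.discard, List.filter_filter]

lemma pvOfList_pairwise_lt (l : List Int) (h : l.Pairwise (· ≤ ·)) :
    (PySem.Set.ofList l).Pairwise (· < ·) := by
  induction l with
  | nil => simp [PySem.Set.ofList_nil]
  | cons x t ih =>
      rw [PySem.Set.ofList_cons]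
      rcases List.pairwise_cons.mp h with ⟨hx, ht⟩
      refine List.pairwise_cons.mpr ⟨?_, ?_⟩
      · intro y hy
        rcases (PySem.Set.mem_discard _ _ _).mp hy with ⟨hy1, hy2⟩
        exact lt_of_le_of_ne (hx y ((PySem.Set.mem_ofList _ _).mp hy1)) (Ne.symm hy2)
      · exact (ih ht).sublist (by simp [PySem.Set.discard])

lemma pvInsertBy_congr (f g : (Int × Int) → (Int × Int) → Bool) (x : Int × Int)
    (ys : List (Int × Int)) (h : ∀ y ∈ ys, f x y = g x y) :
    PySem.List.insertBy f x ys = PySem.List.insertBy g x ys := by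
  induction ys with
  | nil => rfl
  | cons y t ih =>
      simp only [PySem.List.insertBy, h y (by simp)]
      rw [ih (fun z hz => h z (by simp [hz]))]

lemma pvFoldl_insertBy_congr (f g : (Int × Int) → (Int × Int) → Bool)
    (l acc whole : List (Int × Int)) (hl : ∀ y ∈ l, y ∈ whole) (hacc : ∀ y ∈ acc, y ∈ whole)
    (h : ∀ a ∈ whole, ∀ b ∈ whole, f a b = g a b) :
    l.foldl (fun acc x => PySem.List.insertBy f x acc) acc
      = l.foldl (fun acc x => PySem.List.insertBy g x acc) acc := by
  induction l generalizing acc with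
  | nil => rfl
  | cons x t ih =>
      simp only [List.foldl_cons]
      rw [pvInsertBy_congr f g x acc (fun y hy => h x (hl x (by simp)) y (hacc y hy))]
      refine ih _ (fun y hy => hl y (by simp [hy])) ?_
      intro y hy
      rcases (PySem.List.mem_insertBy g x y acc).mp hy with h1 | h1
      · exact h1 ▸ hl x (by simp)
      · exact hacc y h1

-- sorted2 by (fst, snd) is sorted by fst alone when the fsts are distinct
lemma pvSorted2_eq_sorted (zs : List (Int × Int)) (h : (zs.map Prod.fst).Nodup) :
    PySem.List.sorted2 zs Prod.fst Prod.snd = PySem.List.sorted zs Prod.fst := by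
  show zs.foldl (fun acc x => PySem.List.insertBy _ x acc) []
      = zs.foldl (fun acc x => PySem.List.insertBy _ x acc) []
  apply pvFoldl_insertBy_congr _ _ zs [] zs (fun y hy => hy) (by simp)
  intro a ha b hb
  by_cases h1 : a.1 < b.1
  · simp [h1]
  · by_cases h2 : b.1 < a.1
    · simp [h1, h2]
    · have : a = b := List.inj_on_of_nodup_map h ha hb (le_antisymm (not_lt.mp h2) (not_lt.mp h1))
      subst this
      simp

-- B's pass over a list sorted by degree produces each distinct degree with its coefficient sum
lemma pvGroup_eq (ys : List (Int × Int)) (k acc : Int)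
    (hs : ys.Pairwise (fun a b => a.1 ≤ b.1)) (hk : ∀ p ∈ ys, k ≤ p.1) :
    pvGroup k acc ys
      = (PySem.Set.ofList (k :: ys.map Prod.fst)).map
          (fun j => (j, (if j = k then acc else 0) + pvT j ys)) := by
  induction ys generalizing k acc with
  | nil => simp [pvGroup, PySem.Set.ofList_cons, PySem.Set.ofList_nil, pvT, PySem.Set.discard]
  | cons p rest ih =>
      obtain ⟨d, c⟩ := p
      rcases List.pairwise_cons.mp hs with ⟨hd, hrest⟩
      by_cases hdk : d = k
      · subst hdk
        rw [show List.map Prod.fst ((d, c) :: rest) = d :: List.map Prod.fst rest by simp,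
          pvOfList_dup,
          show pvGroup d acc ((d, c) :: rest) = pvGroup d (acc + c) rest by simp [pvGroup],
          ih d (acc + c) hrest hd]
        refine List.map_congr_left (fun j hj => ?_)
        by_cases hj : j = d
        · subst hj
          simp [pvT]
          ring
        · simp [pvT, hj, Ne.symm hj]
      · have hkd : k < d := lt_of_le_of_ne (hk (d, c) (by simp)) (Ne.symm hdk)
        have hgt : ∀ j ∈ (d :: rest.map Prod.fst : List Int), k < j := by
          intro j hj
          rcases List.mem_cons.mp hj with h1 | h1
          · exact h1 ▸ hkd
          · rcases List.mem_map.mp h1 with ⟨p, hp, hpj⟩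
            exact hpj ▸ lt_of_lt_of_le hkd (hd p hp)
        rw [show pvGroup k acc ((d, c) :: rest) = (k, acc) :: pvGroup d c rest by
              simp [pvGroup, hdk],
          List.map_cons, PySem.Set.ofList_cons]
        have hnk : PySem.Set.discard (PySem.Set.ofList ((d, c).1 :: rest.map Prod.fst)) k
            = PySem.Set.ofList ((d, c).1 :: rest.map Prod.fst) := by
          refine List.filter_eq_self.mpr (fun j hj => ?_)
          have := hgt j ((PySem.Set.mem_ofList _ _).mp hj)
          simp only [Bool.not_eq_eq_eq_not, Bool.not_true, beq_eq_false_iff_ne, ne_eq]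
          omega
        rw [show PySem.Set.discard (PySem.Set.ofList ((d, c).1 :: rest.map Prod.fst)) k
            = PySem.Set.ofList ((d, c).1 :: rest.map Prod.fst) from hnk,
          List.map_cons]
        have hT0 : pvT k ((d, c) :: rest) = 0 := by
          have : List.filter (fun p => p.1 == k) ((d, c) :: rest) = [] := by
            refine List.filter_eq_nil_iff.mpr (fun p hp => ?_)
            have : k < p.1 := by
              rcases List.mem_cons.mp hp with h1 | h1
              · exact h1 ▸ hkd
              · exact lt_of_lt_of_le hkd (hd p h1)
            simp only [beq_iff_eq]
            omega
          simp [pvT, this]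
        refine congrArg₂ _ (by simp [hT0]) ?_
        rw [ih d c hrest hd]
        refine List.map_congr_left (fun j hj => ?_)
        have hjk : j ≠ k := by
          have := hgt j ((PySem.Set.mem_ofList _ _).mp hj)
          omega
        by_cases hjd : j = d
        · subst hjd
          simp [pvT, hjk]
        · simp [pvT, hjk, hjd, Ne.symm hjd]

lemma pvT_perm (ys zs : List (Int × Int)) (j : Int) (h : ys.Perm zs) : pvT j ys = pvT j zs :=
  ((h.filter _).map _).sum_eq

-- A computes: the sorted distinct degrees, each with the total coefficient of that degree
lemma pvA_eq (L M : List (Int × Int)) :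
    somme_polynomes L M
      = (PySem.List.sorted (PySem.Set.ofList ((L ++ M).map Prod.fst)) (fun x => x)).map
          (fun k => (k, pvT k (L ++ M))) := by
  show PySem.List.sorted2 _ Prod.fst Prod.snd = _
  rw [PySem.List.foldl_congr_mem (L ++ M)
      (fun d p => if d.contains p.1 then d.modify p.1 0 (· + p.2) else d.insert p.1 p.2)
      (fun d p => d.insert p.1 (d.getD p.1 0 + p.2)) PySem.Dict.empty
      (fun acc x _ => pvBody_eq acc x)]
  have hnd : ((L ++ M).foldl (fun d p => d.insert p.1 (d.getD p.1 0 + p.2))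
      PySem.Dict.empty).keys.Nodup :=
    PySem.Dict.nodup_keys_foldl_insert_key _ _ _ _ (by simp)
  have hitems : ((L ++ M).foldl (fun d p => d.insert p.1 (d.getD p.1 0 + p.2))
      PySem.Dict.empty).items
      = (PySem.Set.ofList ((L ++ M).map Prod.fst)).map (fun k => (k, pvT k (L ++ M))) := by
    rw [PySem.Dict.items_eq_map_keys _ hnd 0,
      PySem.Dict.keys_foldl_insert_key (L ++ M) Prod.fst
        (fun d x => d.getD x.1 0 + x.2) PySem.Dict.empty]
    simp only [PySem.Dict.keys_empty, PySem.Set.update_nil_left]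
    refine List.map_congr_left (fun k _ => ?_)
    rw [pvGetD_fold]
    simp
  rw [hitems, pvSorted2_eq_sorted _ (by
    rw [show ((PySem.Set.ofList ((L ++ M).map Prod.fst)).map
        (fun k => ((k : Int), pvT k (L ++ M)))).map Prod.fst
        = PySem.Set.ofList ((L ++ M).map Prod.fst) by simp [Function.comp_def]]
    exact PySem.Set.nodup_ofList _)]
  exact PySem.List.sorted_eq_of_perm_of_pairwise_lt _ _ Prod.fst
    ((PySem.List.sorted_perm _ _ _).map _)
    (List.pairwise_map.mpr (by
      simpa using PySem.List.sorted_ofList_pairwise_lt ((L ++ M).map Prod.fst)))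

lemma pvT_cons (j k v : Int) (rest : List (Int × Int)) :
    pvT j ((k, v) :: rest) = (if j = k then v else 0) + pvT j rest := by
  by_cases h : j = k
  · subst h; simp [pvT]
  · simp [pvT, h, Ne.symm h]

-- B computes the same canonical form via its one sorted pass
lemma pvB_eq (L M : List (Int × Int)) :
    somme_polynomes_alt L M
      = (PySem.List.sorted (PySem.Set.ofList ((L ++ M).map Prod.fst)) (fun x => x)).map
          (fun k => (k, pvT k (L ++ M))) := by
  rcases hys : PySem.List.sorted (L ++ M) Prod.fst with _ | ⟨⟨k, v⟩, rest⟩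
  · have hx : L ++ M = [] := (PySem.List.sorted_eq_nil_iff _ _ _).mp hys
    rw [somme_polynomes_alt, hys]
    simp [hx, PySem.Set.ofList_nil]
    rfl
  · have hpw := PySem.List.sorted_pairwise (L ++ M) Prod.fst
    rw [hys] at hpw
    rcases List.pairwise_cons.mp hpw with ⟨hd, hrest⟩
    have hperm : ((k, v) :: rest).Perm (L ++ M) := hys ▸ PySem.List.sorted_perm (L ++ M) Prod.fst false
    have hkeys : PySem.List.sorted (PySem.Set.ofList ((L ++ M).map Prod.fst)) (fun x => x)
        = PySem.Set.ofList (((k, v) :: rest).map Prod.fst) := by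
      refine PySem.List.sorted_eq_of_perm_of_pairwise_lt _ _ _ ?_ ?_
      · refine (List.perm_ext_iff_of_nodup (PySem.Set.nodup_ofList _)
          (PySem.Set.nodup_ofList _)).mpr (fun j => ?_)
        rw [PySem.Set.mem_ofList, PySem.Set.mem_ofList]
        constructor
        · intro hj
          rcases List.mem_map.mp hj with ⟨p, hp, hpj⟩
          exact List.mem_map.mpr ⟨p, hperm.mem_iff.mp hp, hpj⟩
        · intro hj
          rcases List.mem_map.mp hj with ⟨p, hp, hpj⟩
          exact List.mem_map.mpr ⟨p, hperm.mem_iff.mpr hp, hpj⟩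
      · exact pvOfList_pairwise_lt _ (List.pairwise_map.mpr hpw)
    rw [somme_polynomes_alt, hys]
    show pvGroup k v rest = _
    rw [pvGroup_eq rest k v hrest (fun p hp => hd p hp), hkeys]
    refine List.map_congr_left (fun j _ => ?_)
    rw [← pvT_cons j k v rest, pvT_perm _ _ j hperm]

-- ===== VERDICT (by name: the statement is the Claim_ definition above) =====
theorem somme_polynomes_spec : Claim_equal_somme_polynomes := by
  intro L M _
  unfold Spec_somme_polynomes
  rw [pvA_eq, pvB_eq]
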